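-- pv_equiv track=rewrite | github.com/Radcliffe/OEIS-Python | src/oeispy/A370/A370470.py | A370470
-- ===== SOURCE A (Python) =====
-- def A370470(n):
--     s = bin(n)[2:]
--     run_length = 0
--     runs = []
--     last_char = '2'
--     for j in range(len(s)):
--         if(s[j] != last_char):
--             last_char = s[j]
--             runs.append(run_length)
--             run_length = 1
--         else:
--             run_length+=1
--     runs.append(run_length)
--     k = ''
--     for j in range(1, len(runs)):
--         k+=str(chr(ord('0')+(j%2)))*abs(runs[j]-runs[j-1])
--     return int(k, 2)
-- ===== SOURCE B (Python) =====
-- def A370470(n):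
--     s = bin(n)[2:]
--     out = []
--     prev = 0
--     cur = 0
--     i = 1
--     last = None
--     for c in s:
--         if last is not None and c != last:
--             out.append(str(i % 2) * abs(cur - prev))
--             prev = cur
--             cur = 1
--             i += 1
--         else:
--             cur += 1
--         last = c
--     out.append(str(i % 2) * abs(cur - prev))
--     return int(''.join(out), 2)
-- ===== Notes on version B (the rewrite author's own statement) =====
-- stated objective: alternative
-- what changed: A makes two sequential passes (first building the full run-length list of the binary string, then scanning that list by index to emit the difference digits); B fuses everything into one streaming pass over the bits that keeps only scalar state (current run length, previous run length, 1-based run index) and emits each difference chunk the moment a run closes, so the intermediate runs list and the '2' sentinel disappear.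
import Mathlib
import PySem

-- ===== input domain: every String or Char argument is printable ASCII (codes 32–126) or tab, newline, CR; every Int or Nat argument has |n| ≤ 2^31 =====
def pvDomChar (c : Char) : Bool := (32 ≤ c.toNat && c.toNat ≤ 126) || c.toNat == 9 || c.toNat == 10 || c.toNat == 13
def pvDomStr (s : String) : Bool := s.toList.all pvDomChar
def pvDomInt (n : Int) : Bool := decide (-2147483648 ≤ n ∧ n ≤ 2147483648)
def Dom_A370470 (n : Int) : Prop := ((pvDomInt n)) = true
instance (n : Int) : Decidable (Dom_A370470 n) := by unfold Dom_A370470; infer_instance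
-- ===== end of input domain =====

-- B replaces A's two sequential passes (build the full run-length list, then scan it by index)
-- by one streaming pass over the bits keeping only scalar state; objective: alternative
-- decomposition, same asymptotic cost.

-- ===== PORT A =====
-- bin(n)[2:] as a list of characters (shared builtin prep of both Pythons)
def pvBinTail (n : Int) : List Char :=
  PySem.List.slice (PySem.Int.pyBin n).toList (some 2) none

-- chr(ord('0') + (j % 2))
def pvDig (j : Int) : Char := Char.ofNat ('0'.toNat + (PySem.Int.mod j 2).toNat)

-- body of A's first loop, on state (run_length, runs, last_char)
def pvStepA (p : Int × List Int × Char) (c : Char) : Int × List Int × Char :=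
  if c ≠ p.2.2 then (1, p.2.1 ++ [p.1], c) else (p.1 + 1, p.2.1, p.2.2)

-- body of A's second loop: k += chr(ord('0')+(j%2)) * abs(runs[j]-runs[j-1])
def pvStepK (runs : List Int) (k : List Char) (j : Int) : List Char :=
  k ++ PySem.List.pyRepeat [pvDig j]
    |PySem.List.pyGetD runs j 0 - PySem.List.pyGetD runs (j - 1) 0|

def A370470 (n : Int) : Int :=
  let s := pvBinTail n
  -- for j in range(len(s)): … (s[j] is always in range here)
  let st := (PySem.List.pyRange 0 (PySem.List.len s) 1).foldl
    (fun p j => pvStepA p (PySem.List.pyGetD s j ' ')) (0, [], '2')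
  let runs := st.2.1 ++ [st.1]
  -- for j in range(1, len(runs)): …
  let k := (PySem.List.pyRange 1 (PySem.List.len runs) 1).foldl (pvStepK runs) []
  -- int(k, 2); k is a nonempty 0/1 string whenever this line is reached, so no ValueError
  (PySem.Int.ofCharsBase? k 2).getD 0

-- ===== PORT B =====
-- body of B's loop, on state (out, prev, cur, i, last)
def pvStepB (p : List Char × Int × Int × Int × Option Char) (c : Char) :
    List Char × Int × Int × Int × Option Char :=
  match p.2.2.2.2 with
  | some l =>
    if c ≠ l then
      (p.1 ++ PySem.List.pyRepeat (PySem.Int.toStr (PySem.Int.mod p.2.2.2.1 2)).toList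
         |p.2.2.1 - p.2.1|,
       p.2.2.1, 1, p.2.2.2.1 + 1, some c)
    else (p.1, p.2.1, p.2.2.1 + 1, p.2.2.2.1, some c)
  | none => (p.1, p.2.1, p.2.2.1 + 1, p.2.2.2.1, some c)

-- final out.append(str(i%2)*abs(cur-prev)) followed by ''.join(out)
def pvFinB (q : List Char × Int × Int × Int × Option Char) : List Char :=
  q.1 ++ PySem.List.pyRepeat (PySem.Int.toStr (PySem.Int.mod q.2.2.2.1 2)).toList
    |q.2.2.1 - q.2.1|

def A370470_alt (n : Int) : Int :=
  let s := pvBinTail n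
  let st := s.foldl pvStepB ([], 0, 0, 1, none)
  -- int(''.join(out), 2); the joined string is nonempty 0/1 whenever this line is reached
  (PySem.Int.ofCharsBase? (pvFinB st) 2).getD 0

-- ===== PRECONDITION & SPEC =====
def Spec_A370470 (n : Int) (out : Int) : Prop := out = A370470_alt n
instance (n : Int) (out : Int) : Decidable (Spec_A370470 n out) := by unfold Spec_A370470; infer_instance

-- ===== CLAIM (what is proved, stated in full; the proofs are below) =====
def Claim_equal_A370470 : Prop := ∀ (n : Int), Dom_A370470 n → Spec_A370470 n (A370470 n)

-- ===== LEMMAS AND PROOFS =====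

-- reference run-length decomposition: (completed runs, final run length, final last char)
def pvRuns (last : Char) (cur : Int) : List Char → List Int × Int × Char
  | [] => ([], cur, last)
  | c :: rest =>
    if c ≠ last then
      let r := pvRuns c 1 rest
      (cur :: r.1, r.2)
    else pvRuns last (cur + 1) rest

-- reference rendering of the difference string
def pvRender (prev i : Int) : List Int → List Char
  | [] => []
  | r :: rest => List.replicate (r - prev).natAbs (pvDig i) ++ pvRender r (i + 1) rest

-- the common normal form of both ports
def pvNF (s : List Char) : List Char :=
  match s with
  | [] => []
  | c :: rest => pvRender 0 1 ((pvRuns c 1 rest).1 ++ [(pvRuns c 1 rest).2.1])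

theorem pvDigStr (i : Int) :
    (PySem.Int.toStr (PySem.Int.mod i 2)).toList = [pvDig i] := by
  have h0 := PySem.Int.mod_nonneg i (b := 2) (by norm_num)
  have h1 := PySem.Int.mod_lt i (b := 2) (by norm_num)
  unfold pvDig
  interval_cases h : PySem.Int.mod i 2 <;> decide

theorem pvChunkStr (i m : Int) :
    PySem.List.pyRepeat (PySem.Int.toStr (PySem.Int.mod i 2)).toList |m|
      = List.replicate m.natAbs (pvDig i) := by
  rw [pvDigStr, PySem.List.pyRepeat_singleton]
  congr 1
  simp only [Int.abs_eq_natAbs, Int.toNat_natCast]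

theorem pvChunkStrA (i m : Int) :
    PySem.List.pyRepeat [pvDig i] |m| = List.replicate m.natAbs (pvDig i) := by
  rw [PySem.List.pyRepeat_singleton]
  congr 1
  simp only [Int.abs_eq_natAbs, Int.toNat_natCast]

-- A's first loop computes pvRuns
theorem pvAfold (chars : List Char) : ∀ (last : Char) (cur : Int) (rs : List Int),
    chars.foldl pvStepA (cur, rs, last)
    = ((pvRuns last cur chars).2.1, rs ++ (pvRuns last cur chars).1,
       (pvRuns last cur chars).2.2) := by
  induction chars with
  | nil => intro last cur rs; simp [pvRuns]
  | cons c rest ih =>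
    intro last cur rs
    by_cases h : c = last
    · subst h
      rw [List.foldl_cons,
        show pvStepA (cur, rs, c) c = (cur + 1, rs, c) by simp [pvStepA],
        show pvRuns c cur (c :: rest) = pvRuns c (cur + 1) rest by simp [pvRuns]]
      exact ih c (cur + 1) rs
    · rw [List.foldl_cons,
        show pvStepA (cur, rs, last) c = (1, rs ++ [cur], c) by simp [pvStepA, h],
        show pvRuns last cur (c :: rest)
          = (cur :: (pvRuns c 1 rest).1, (pvRuns c 1 rest).2) by simp [pvRuns, h],
        ih c 1 (rs ++ [cur])]
      simp

-- A's second loop renders pvRender, by induction on the number of remaining indices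
theorem pvAsecond (runs : List Int) : ∀ (d t : Nat) (acc : List Char), 1 ≤ t →
    runs.length = t + d →
    (PySem.List.pyRange (t : Int) (runs.length : Int) 1).foldl (pvStepK runs) acc
    = acc ++ pvRender (runs.getD (t - 1) 0) (t : Int) (runs.drop t) := by
  intro d
  induction d with
  | zero =>
    intro t acc ht hlen
    rw [PySem.List.pyRange_one_eq_nil (by omega)]
    have hd : runs.drop t = [] := List.drop_eq_nil_of_le (by omega)
    simp [hd, pvRender]
  | succ d ih =>
    intro t acc ht hlen
    have htlt : t < runs.length := by omega
    rw [PySem.List.pyRange_one_cons (by exact_mod_cast (by omega : (t:Int) < (runs.length : Int)))]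
    rw [List.foldl_cons]
    have hstep : pvStepK runs acc (t : Int)
        = acc ++ List.replicate (runs[t] - runs.getD (t - 1) 0).natAbs (pvDig (t : Int)) := by
      unfold pvStepK
      have hget : PySem.List.pyGetD runs (t : Int) 0 = runs.getD t 0 :=
        PySem.List.pyGetD_natCast runs t 0
      have hc : ((t : Int) - 1) = ((t - 1 : Nat) : Int) := by omega
      rw [hget, hc, PySem.List.pyGetD_natCast runs (t - 1) 0, pvChunkStrA]
      rw [List.getD_eq_getElem runs 0 htlt]
    rw [hstep]
    have hc1 : ((t : Int) + 1) = ((t + 1 : Nat) : Int) := by push_cast; ring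
    rw [hc1, ih (t + 1) _ (by omega) (by omega)]
    rw [List.drop_eq_getElem_cons htlt]
    simp only [pvRender]
    have hgetD : runs.getD t 0 = runs[t] := List.getD_eq_getElem runs 0 htlt
    have hsub : (t + 1 : Nat) - 1 = t := by omega
    rw [hsub, hgetD]
    push_cast
    simp [List.append_assoc]

-- B's loop from a started state renders pvRender of pvRuns
theorem pvBfold (chars : List Char) : ∀ (last : Char) (cur i : Int) (out : List Char) (prev : Int),
    pvFinB (chars.foldl pvStepB (out, prev, cur, i, some last))
    = out ++ pvRender prev i ((pvRuns last cur chars).1 ++ [(pvRuns last cur chars).2.1]) := by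
  induction chars with
  | nil =>
    intro last cur i out prev
    simp only [List.foldl_nil, pvFinB, pvRuns]
    rw [pvChunkStr]
    simp [pvRender]
  | cons c rest ih =>
    intro last cur i out prev
    by_cases h : c = last
    · subst h
      rw [List.foldl_cons,
        show pvStepB (out, prev, cur, i, some c) c = (out, prev, cur + 1, i, some c) by
          simp [pvStepB],
        show pvRuns c cur (c :: rest) = pvRuns c (cur + 1) rest by simp [pvRuns]]
      exact ih c (cur + 1) i out prev
    · rw [List.foldl_cons,
        show pvStepB (out, prev, cur, i, some last) c
            = (out ++ PySem.List.pyRepeat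
                 (PySem.Int.toStr (PySem.Int.mod i 2)).toList |cur - prev|,
               cur, 1, i + 1, some c) by
          simp [pvStepB, h],
        show pvRuns last cur (c :: rest)
          = (cur :: (pvRuns c 1 rest).1, (pvRuns c 1 rest).2) by simp [pvRuns, h],
        ih c 1 (i + 1) _ cur, pvChunkStr]
      simp [pvRender, List.append_assoc]

-- '2' never occurs in the output of Nat.toDigits 2
theorem pvToDigitsCore_ne (fuel : Nat) : ∀ (m : Nat) (ds : List Char),
    (∀ c ∈ ds, c ≠ '2') → ∀ c ∈ Nat.toDigitsCore 2 fuel m ds, c ≠ '2' := by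
  induction fuel with
  | zero => intro m ds hds c hc; exact hds c hc
  | succ fuel ih =>
    intro m ds hds c hc
    have hd : (m % 2).digitChar ≠ '2' := by
      rcases Nat.mod_two_eq_zero_or_one m with h | h <;> rw [h] <;> decide
    rw [Nat.toDigitsCore] at hc
    by_cases h0 : m / 2 = 0
    · rw [if_pos h0] at hc
      rcases List.mem_cons.mp hc with hc | hc
      · subst hc; exact hd
      · exact hds c hc
    · rw [if_neg h0] at hc
      refine ih (m / 2) _ ?_ c hc
      intro x hx
      rcases List.mem_cons.mp hx with hx | hx
      · subst hx; exact hd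
      · exact hds x hx

theorem pvBinTail_ne_two (n : Int) : ∀ c ∈ pvBinTail n, c ≠ '2' := by
  intro c hc
  unfold pvBinTail at hc
  rw [PySem.List.slice_from _ (by norm_num), PySem.Int.toList_pyBin,
      PySem.Int.toBinChars0b] at hc
  have hdig : ∀ (m : Nat), c ∈ Nat.toDigits 2 m → c ≠ '2' := by
    intro m hm
    exact pvToDigitsCore_ne (m + 1) m [] (by simp) c hm
  by_cases hneg : n < 0
  · rw [if_pos hneg,
      show List.drop (2 : Int).toNat ('-' :: '0' :: 'b' :: Nat.toDigits 2 n.natAbs)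
        = 'b' :: Nat.toDigits 2 n.natAbs from rfl] at hc
    rcases List.mem_cons.mp hc with hc | hc
    · subst hc; decide
    · exact hdig _ hc
  · rw [if_neg hneg,
      show List.drop (2 : Int).toNat ('0' :: 'b' :: Nat.toDigits 2 n.toNat)
        = Nat.toDigits 2 n.toNat from rfl] at hc
    exact hdig _ hc

theorem pvA_eq (n : Int) :
    A370470 n = (PySem.Int.ofCharsBase? (pvNF (pvBinTail n)) 2).getD 0 := by
  have h2 := pvBinTail_ne_two n
  unfold A370470
  simp only [PySem.List.len_eq]
  rw [PySem.List.foldl_pyRange_zero_pyGetD' (pvBinTail n) ' ' pvStepA (0, [], '2')]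
  cases hs : pvBinTail n with
  | nil =>
    simp [pvNF, PySem.List.pyRange_one_eq_nil]
  | cons c rest =>
    rw [pvAfold]
    have hc2 : c ≠ '2' := h2 c (by rw [hs]; exact List.mem_cons_self)
    have hr : pvRuns '2' 0 (c :: rest)
        = ((0 : Int) :: (pvRuns c 1 rest).1, (pvRuns c 1 rest).2) := by
      rw [pvRuns, if_pos hc2]
    rw [hr]
    show (PySem.Int.ofCharsBase?
        ((PySem.List.pyRange ((1 : Nat) : Int)
            (((0 : Int) :: ((pvRuns c 1 rest).1 ++ [(pvRuns c 1 rest).2.1])).length : Int) 1).foldl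
          (pvStepK ((0 : Int) :: ((pvRuns c 1 rest).1 ++ [(pvRuns c 1 rest).2.1]))) []) 2).getD 0
      = (PySem.Int.ofCharsBase? (pvNF (c :: rest)) 2).getD 0
    have h2nd := pvAsecond ((0 : Int) :: ((pvRuns c 1 rest).1 ++ [(pvRuns c 1 rest).2.1]))
      ((pvRuns c 1 rest).1.length + 1) 1 [] (by omega) (by simp; omega)
    rw [h2nd]
    simp only [List.drop_succ_cons, List.drop_zero, List.nil_append, Nat.cast_one]
    simp [pvNF]

theorem pvB_eq (n : Int) :
    A370470_alt n = (PySem.Int.ofCharsBase? (pvNF (pvBinTail n)) 2).getD 0 := by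
  unfold A370470_alt
  cases hs : pvBinTail n with
  | nil =>
    simp only [List.foldl_nil, pvFinB, pvNF]
    rw [pvChunkStr]
    simp
  | cons c rest =>
    simp only [List.foldl_cons]
    have hstep : pvStepB ([], 0, 0, 1, none) c = ([], 0, 1, 1, some c) := rfl
    rw [hstep, pvBfold rest c 1 1 [] 0]
    simp [pvNF]

-- ===== VERDICT (by name: the statement is the Claim_ definition above) =====
theorem A370470_spec : Claim_equal_A370470 := by
  intro n _
  unfold Spec_A370470
  rw [pvA_eq, pvB_eq]
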